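-- pv_equiv track=rewrite | github.com/junbolian/ReLoop | reloop/perturbation.py | _match_param
-- ===== SOURCE A (Python) =====
-- from typing import List, Dict, Any, Optional
--
-- def _match_param(params: List[Dict], param_name: str) -> Optional[Dict]:
--     """Fuzzy-match *param_name* against a list of extracted code parameters."""
--     # Exact match
--     for p in params:
--         if p['name'] == param_name or p['access_path'] == param_name:
--             return p
--
--     # Normalised match
--     param_name_lower = param_name.lower().replace('_', '').replace('-', '')
--     for p in params:
--         p_lower = p['name'].lower().replace('_', '').replace('-', '')
--         if param_name_lower in p_lower or p_lower in param_name_lower: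
--             return p
--
--     return None
-- ===== SOURCE B (Python) =====
-- def _match_param(params, param_name):
--     """Fuzzy-match param_name against a list of extracted code parameters,
--     in one pass: exact matches return immediately; the first normalized
--     (substring either way) candidate is remembered as a fallback."""
--     param_name_lower = param_name.lower().replace('_', '').replace('-', '')
--     fallback = None
--     for p in params:
--         if p['name'] == param_name or p['access_path'] == param_name:
--             return p
--         if fallback is None:
--             p_lower = p['name'].lower().replace('_', '').replace('-', '')
--             if param_name_lower in p_lower or p_lower in param_name_lower:
--                 fallback = p
--     return fallback
-- ===== Notes on version B (the rewrite author's own statement) =====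
-- stated objective: alternative
-- what changed: Two sequential scans (exact pass, then normalized pass) are fused into a single loop that returns exact matches immediately and remembers the first normalized-substring candidate as a fallback, with the normalized needle computed once up front.
import Mathlib
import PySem

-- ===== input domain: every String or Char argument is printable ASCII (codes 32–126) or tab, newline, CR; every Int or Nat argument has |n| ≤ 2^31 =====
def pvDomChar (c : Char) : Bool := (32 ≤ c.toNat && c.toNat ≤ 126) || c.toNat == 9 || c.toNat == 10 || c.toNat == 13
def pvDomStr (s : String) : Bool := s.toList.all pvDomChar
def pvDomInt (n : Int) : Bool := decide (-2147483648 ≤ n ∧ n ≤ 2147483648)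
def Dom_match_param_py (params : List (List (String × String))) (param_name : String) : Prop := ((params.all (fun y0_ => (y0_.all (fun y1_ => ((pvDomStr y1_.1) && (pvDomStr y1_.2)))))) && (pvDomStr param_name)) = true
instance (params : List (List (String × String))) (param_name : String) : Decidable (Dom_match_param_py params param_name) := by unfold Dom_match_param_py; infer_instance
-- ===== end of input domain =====

-- B fuses A's two sequential scans into one pass that returns exact matches immediately and
-- keeps the first normalized-substring candidate as a fallback (alternative decomposition, same cost).


-- ===== PORT A =====
-- p['name'] etc.: Pre_ guarantees the key is present, so getD never takes its default
def pvGetS (p : List (String × String)) (k : String) : String := PySem.Dict.getD (PySem.Dict.mk p) k ""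

-- s.lower().replace('_', '').replace('-', '')
def pvNorm (s : String) : String :=
  PySem.Str.replace (PySem.Str.replace (PySem.Str.lower s) "_" "") "-" ""

-- first for-loop of A (exact match, early return)
def pvLoop1 (param_name : String) : List (List (String × String)) → Option (List (String × String))
  | [] => none
  | p :: rest =>
      if pvGetS p "name" == param_name || pvGetS p "access_path" == param_name then some p
      else pvLoop1 param_name rest

-- second for-loop of A (normalized match, early return)
def pvLoop2 (pnl : String) : List (List (String × String)) → Option (List (String × String))
  | [] => none
  | p :: rest =>
      let p_lower := pvNorm (pvGetS p "name")
      if PySem.Str.isIn pnl p_lower || PySem.Str.isIn p_lower pnl then some p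
      else pvLoop2 pnl rest

def match_param_py (params : List (List (String × String))) (param_name : String) : Option (List (String × String)) :=
  match pvLoop1 param_name params with
  | some p => some p
  | none => pvLoop2 (pvNorm param_name) params

-- ===== PORT B =====
-- B's single loop: exact match returns at once; the first normalized candidate is kept in fb
def pvLoopB (param_name pnl : String) :
    List (List (String × String)) → Option (List (String × String)) → Option (List (String × String))
  | [], fb => fb
  | p :: rest, fb =>
      if pvGetS p "name" == param_name || pvGetS p "access_path" == param_name then some p
      else
        pvLoopB param_name pnl rest
          (if fb.isNone then
            (let p_lower := pvNorm (pvGetS p "name")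
             if PySem.Str.isIn pnl p_lower || PySem.Str.isIn p_lower pnl then some p else fb)
           else fb)

def match_param_py_alt (params : List (List (String × String))) (param_name : String) : Option (List (String × String)) :=
  pvLoopB param_name (pvNorm param_name) params none

-- ===== PRECONDITION & SPEC =====
-- Pre_ excludes exactly the inputs on which A's dict subscripts raise KeyError: either every dict
-- carries both 'name' and 'access_path' (both loops can complete), or an exact match at position i
-- returns before any malformed dict is read (dicts before i fully keyed and non-matching; the dict
-- at i has 'name', and matches by name or has a matching 'access_path').
def pvKeyed (p : List (String × String)) : Prop :=
  PySem.Dict.contains (PySem.Dict.mk p) "name" = true ∧ PySem.Dict.contains (PySem.Dict.mk p) "access_path" = true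

def Pre_match_param_py (params : List (List (String × String))) (param_name : String) : Prop :=
  (∀ p ∈ params, pvKeyed p) ∨
  (∃ i < params.length,
    (∀ j < i, pvKeyed (params.getD j []) ∧
      pvGetS (params.getD j []) "name" ≠ param_name ∧
      pvGetS (params.getD j []) "access_path" ≠ param_name) ∧
    PySem.Dict.contains (PySem.Dict.mk (params.getD i [])) "name" = true ∧
    (pvGetS (params.getD i []) "name" = param_name ∨
      (PySem.Dict.contains (PySem.Dict.mk (params.getD i [])) "access_path" = true ∧
       pvGetS (params.getD i []) "access_path" = param_name)))
instance (params : List (List (String × String))) (param_name : String) : Decidable (Pre_match_param_py params param_name) := by unfold Pre_match_param_py pvKeyed; infer_instance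

def pvWitness_match_param_py : (List (List (String × String))) × String :=
  ([[("name", "x"), ("access_path", "a.x")]], "x")

def Spec_match_param_py (params : List (List (String × String))) (param_name : String) (out : Option (List (String × String))) : Prop := out = match_param_py_alt params param_name
instance (params : List (List (String × String))) (param_name : String) (out : Option (List (String × String))) : Decidable (Spec_match_param_py params param_name out) := by unfold Spec_match_param_py; infer_instance

-- ===== CLAIM (what is proved, stated in full; the proofs are below) =====
def Claim_equal_match_param_py : Prop := ∀ (params : List (List (String × String))) (param_name : String), Dom_match_param_py params param_name → Pre_match_param_py params param_name → Spec_match_param_py params param_name (match_param_py params param_name)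

-- ===== LEMMAS AND PROOFS =====
-- Invariant of B's loop: with fallback state fb it computes "first exact match in the rest,
-- else the earlier fallback, else the first normalized match in the rest".
theorem pvLoopB_eq (param_name pnl : String) (params : List (List (String × String)))
    (fb : Option (List (String × String))) :
    pvLoopB param_name pnl params fb =
      match pvLoop1 param_name params with
      | some p => some p
      | none => fb.orElse (fun _ => pvLoop2 pnl params) := by
  induction params generalizing fb with
  | nil => cases fb <;> rfl
  | cons p rest ih =>
      simp only [pvLoopB, pvLoop1, pvLoop2]
      by_cases hx : (pvGetS p "name" == param_name || pvGetS p "access_path" == param_name) = true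
      · simp [hx]
      · cases fb with
        | some q => simp [hx, ih, Option.orElse]
        | none =>
            simp only [hx, ih, Option.isNone_none, if_true, Bool.false_eq_true, if_false]
            cases pvLoop1 param_name rest
            · simp only [Option.orElse]
              split_ifs <;> rfl
            · rfl

-- ===== VERDICT (by name: the statement is the Claim_ definition above) =====
theorem match_param_py_spec : Claim_equal_match_param_py := by
  intro params param_name _ _
  unfold Spec_match_param_py match_param_py match_param_py_alt
  rw [pvLoopB_eq]
  cases pvLoop1 param_name params <;> rfl
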